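-- pv_equiv track=rewrite | github.com/SymboLiclight-Ting/SL | src/symboliclight/formatter.py | line_comment_index
-- ===== SOURCE A (Python) =====
-- def line_comment_index(line: str) -> int | None:
--     in_string = False
--     escaped = False
--     for index, char in enumerate(line):
--         if escaped:
--             escaped = False
--             continue
--         if char == "\\" and in_string:
--             escaped = True
--             continue
--         if char == '"':
--             in_string = not in_string
--             continue
--         if not in_string and char == "/" and index + 1 < len(line) and line[index + 1] == "/":
--             return index
--     return None
-- ===== SOURCE B (Python) =====
-- def line_comment_index(line: str) -> int | None:
--     # Token-skipping scan: jump over whole string literals instead of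
--     # tracking in_string/escaped flags character by character.
--     n = len(line)
--     i = 0
--     while i < n:
--         c = line[i]
--         if c == '"':
--             i += 1
--             while i < n:
--                 ch = line[i]
--                 if ch == '\\':
--                     i += 2
--                 elif ch == '"':
--                     i += 1
--                     break
--                 else:
--                     i += 1
--         elif c == '/' and line.startswith('//', i):
--             return i
--         else:
--             i += 1
--     return None
-- ===== Notes on version B (the rewrite author's own statement) =====
-- stated objective: alternative
-- what changed: Replaced A's per-character state machine with in_string/escaped flags by a two-level token-skipping scan that jumps over entire string literals (inner loop consumes a literal, outer loop looks for '//').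
import Mathlib
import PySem

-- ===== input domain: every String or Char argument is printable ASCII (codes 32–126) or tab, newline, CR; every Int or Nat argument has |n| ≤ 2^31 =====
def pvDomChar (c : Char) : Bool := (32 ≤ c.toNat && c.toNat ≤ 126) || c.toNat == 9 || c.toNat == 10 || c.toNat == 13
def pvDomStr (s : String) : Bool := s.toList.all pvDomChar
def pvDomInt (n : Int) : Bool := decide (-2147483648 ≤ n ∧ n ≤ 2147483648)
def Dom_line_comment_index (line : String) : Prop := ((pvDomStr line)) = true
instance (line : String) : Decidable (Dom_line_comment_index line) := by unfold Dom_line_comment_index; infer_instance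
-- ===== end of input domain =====

-- B replaces A's per-character in_string/escaped flag machine by a token-skipping scan
-- that jumps over whole string literals; objective: alternative (same O(n) cost).

-- ===== PORT A =====
-- A's for-loop over enumerate(line) with the in_string/escaped flags.
def aLoop : List Char → Int → Bool → Bool → Option Int
  | [], _, _, _ => none
  | c :: rest, i, inS, esc =>
    if esc then aLoop rest (i+1) inS false
    else if c = '\\' ∧ inS = true then aLoop rest (i+1) inS true
    else if c = '"' then aLoop rest (i+1) (!inS) esc
    else if inS = false ∧ c = '/' ∧ rest.head? = some '/' then some i
    else aLoop rest (i+1) inS esc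

def line_comment_index (line : String) : Option Int :=
  aLoop line.toList 0 false false

-- ===== PORT B =====
-- B's inner while-loop: number of characters consumed after an opening quote
-- (backslash skips two characters, an unescaped quote closes the literal).
def skipLen : List Char → Nat
  | [] => 0
  | c :: rest =>
    if c = '\\' then 2 + skipLen (rest.drop 1)
    else if c = '"' then 1
    else 1 + skipLen rest
termination_by l => l.length
decreasing_by all_goals simp

-- B's outer while-loop.
def bScan : List Char → Int → Option Int
  | [], _ => none
  | c :: rest, i =>
    if c = '"' then bScan (rest.drop (skipLen rest)) (i + 1 + skipLen rest)
    else if c = '/' ∧ rest.head? = some '/' then some i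
    else bScan rest (i+1)
termination_by l _ => l.length
decreasing_by all_goals simp

def line_comment_index_alt (line : String) : Option Int :=
  bScan line.toList 0

-- ===== PRECONDITION & SPEC =====
def Spec_line_comment_index (line : String) (out : Option Int) : Prop := out = line_comment_index_alt line
instance (line : String) (out : Option Int) : Decidable (Spec_line_comment_index line out) := by unfold Spec_line_comment_index; infer_instance

-- ===== CLAIM (what is proved, stated in full; the proofs are below) =====
def Claim_equal_line_comment_index : Prop := ∀ (line : String), Dom_line_comment_index line → Spec_line_comment_index line (line_comment_index line)

-- ===== LEMMAS AND PROOFS =====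

-- Inside a string literal, A's flag machine ends up exactly where B's skipLen jump lands.
theorem str_lemma : ∀ (n : Nat) (l : List Char), l.length ≤ n → ∀ (i : Int),
    aLoop l i true false = aLoop (l.drop (skipLen l)) (i + (skipLen l : Int)) false false := by
  intro n
  induction n with
  | zero =>
    intro l hl i
    have : l = [] := List.eq_nil_of_length_eq_zero (Nat.le_zero.mp hl)
    subst this; simp [aLoop, skipLen]
  | succ n ih =>
    intro l hl i
    match l with
    | [] => simp [aLoop, skipLen]
    | c :: rest =>
      by_cases hb : c = '\\'
      · subst hb
        match rest with
        | [] => simp [aLoop, skipLen]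
        | d :: rest' =>
          have h1 : aLoop ('\\' :: d :: rest') i true false = aLoop rest' (i+1+1) true false := by
            simp [aLoop]
          rw [h1, ih rest' (by simp at hl ⊢; omega)]
          have h2 : skipLen ('\\' :: d :: rest') = 2 + skipLen rest' := by simp [skipLen]
          rw [h2]
          congr 1
          · rw [show 2 + skipLen rest' = skipLen rest' + 1 + 1 from by omega,
                List.drop_succ_cons, List.drop_succ_cons]
          · push_cast; ring
      · by_cases hq : c = '"'
        · subst hq; simp [aLoop, skipLen]
        · have h1 : aLoop (c :: rest) i true false = aLoop rest (i+1) true false := by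
            simp [aLoop, hb, hq]
          rw [h1, ih rest (by simp at hl ⊢; omega)]
          have h2 : skipLen (c :: rest) = 1 + skipLen rest := by simp [skipLen, hb, hq]
          rw [h2]
          congr 1
          · rw [show 1 + skipLen rest = skipLen rest + 1 from by omega, List.drop_succ_cons]
          · push_cast; ring

-- Outside a string, A's flag machine agrees step by step with B's token scan.
theorem main_lemma : ∀ (n : Nat) (l : List Char), l.length ≤ n → ∀ (i : Int),
    aLoop l i false false = bScan l i := by
  intro n
  induction n with
  | zero =>
    intro l hl i
    have : l = [] := List.eq_nil_of_length_eq_zero (Nat.le_zero.mp hl)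
    subst this; simp [aLoop, bScan]
  | succ n ih =>
    intro l hl i
    match l with
    | [] => simp [aLoop, bScan]
    | c :: rest =>
      by_cases hq : c = '"'
      · subst hq
        have h1 : aLoop ('"' :: rest) i false false = aLoop rest (i+1) true false := by
          simp [aLoop]
        rw [h1, str_lemma rest.length rest le_rfl (i+1)]
        have hlen : (rest.drop (skipLen rest)).length ≤ n := by
          have := List.length_drop (l := rest) (i := skipLen rest)
          simp at hl; omega
        rw [ih _ hlen]
        simp [bScan]
      · by_cases hs : c = '/' ∧ rest.head? = some '/'
        · simp [aLoop, bScan, hs.1, hs.2]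
        · have h1 : aLoop (c :: rest) i false false = aLoop rest (i+1) false false := by
            simp [aLoop, hq]
            intro h1 h2; exact absurd ⟨h1, h2⟩ hs
          have h2 : bScan (c :: rest) i = bScan rest (i+1) := by
            simp [bScan, hq, hs]
          rw [h1, h2, ih rest (by simp at hl ⊢; omega)]

-- ===== VERDICT (by name: the statement is the Claim_ definition above) =====
theorem line_comment_index_spec : Claim_equal_line_comment_index := by
  intro line _
  unfold Spec_line_comment_index line_comment_index line_comment_index_alt
  exact main_lemma line.toList.length line.toList le_rfl 0
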